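-- pv_equiv track=rewrite | github.com/cannmirror/ops-math | scripts/ci/ops_test_util.py | _find_column_indices
-- ===== SOURCE A (Python) =====
-- def _find_column_indices(headers):
--     """查找关键列索引
--
--     Args:
--         headers: CSV表头列表
--
--     Returns:
--         tuple: (precision_status索引, dyn_precision索引, cst_precision索引, bin_precision索引)
--     """
--     precision_idx = -1
--     dyn_idx = -1
--     cst_idx = -1
--     bin_idx = -1
--
--     for i, h in enumerate(headers):
--         if h == 'precision_status':
--             precision_idx = i
--         elif h == 'dyn_precision':
--             dyn_idx = i
--         elif h == 'cst_precision':
--             cst_idx = i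
--         elif h == 'bin_precision':
--             bin_idx = i
--
--     return precision_idx, dyn_idx, cst_idx, bin_idx
-- ===== SOURCE B (Python) =====
-- def _find_column_indices(headers):
--     """Search back-to-front: the first hit from the end is the last occurrence."""
--     def rfind(name):
--         for i, h in reversed(list(enumerate(headers))):
--             if h == name:
--                 return i
--         return -1
--     return (rfind('precision_status'), rfind('dyn_precision'),
--             rfind('cst_precision'), rfind('bin_precision'))
-- ===== Notes on version B (the rewrite author's own statement) =====
-- stated objective: alternative
-- what changed: Replaces A's single forward pass that keeps overwriting four accumulators with four staged back-to-front searches, each returning early at the first match from the end (which is the last occurrence).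
import Mathlib
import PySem

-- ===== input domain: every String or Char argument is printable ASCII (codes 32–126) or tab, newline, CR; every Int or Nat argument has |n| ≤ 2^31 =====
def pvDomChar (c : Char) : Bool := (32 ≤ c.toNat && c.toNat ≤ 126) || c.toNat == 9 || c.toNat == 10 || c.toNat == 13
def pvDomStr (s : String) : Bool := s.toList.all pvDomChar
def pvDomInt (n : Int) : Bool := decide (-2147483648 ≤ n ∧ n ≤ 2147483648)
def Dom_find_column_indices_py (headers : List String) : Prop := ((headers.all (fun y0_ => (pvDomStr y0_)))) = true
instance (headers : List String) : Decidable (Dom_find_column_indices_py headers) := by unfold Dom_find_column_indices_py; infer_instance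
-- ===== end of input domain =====

-- B replaces A's single forward four-accumulator scan by four staged back-to-front
-- early-exit searches (first match from the end = last occurrence); same O(n) cost.
-- ===== PORT A =====
def find_column_indices_py (headers : List String) : Int × Int × Int × Int :=
  (PySem.List.enumerate headers).foldl
    (fun st p =>
      if p.2 = "precision_status" then (p.1, st.2.1, st.2.2.1, st.2.2.2)
      else if p.2 = "dyn_precision" then (st.1, p.1, st.2.2.1, st.2.2.2)
      else if p.2 = "cst_precision" then (st.1, st.2.1, p.1, st.2.2.2)
      else if p.2 = "bin_precision" then (st.1, st.2.1, st.2.2.1, p.1)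
      else st)
    (-1, -1, -1, -1)

-- ===== PORT B =====
-- B's inner `rfind`: walk the reversed enumerate list, return at the first match, else -1.
def pvRFind (name : String) : List (Int × String) → Int
  | [] => -1
  | p :: t => if p.2 = name then p.1 else pvRFind name t

def find_column_indices_py_alt (headers : List String) : Int × Int × Int × Int :=
  let rev := (PySem.List.enumerate headers).reverse
  (pvRFind "precision_status" rev, pvRFind "dyn_precision" rev,
   pvRFind "cst_precision" rev, pvRFind "bin_precision" rev)

-- ===== PRECONDITION & SPEC =====
def Spec_find_column_indices_py (headers : List String) (out : Int × Int × Int × Int) : Prop := out = find_column_indices_py_alt headers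
instance (headers : List String) (out : Int × Int × Int × Int) : Decidable (Spec_find_column_indices_py headers out) := by unfold Spec_find_column_indices_py; infer_instance

-- ===== CLAIM (what is proved, stated in full; the proofs are below) =====
def Claim_equal_find_column_indices_py : Prop := ∀ (headers : List String), Dom_find_column_indices_py headers → Spec_find_column_indices_py headers (find_column_indices_py headers)

-- ===== LEMMAS AND PROOFS =====

-- `pvRFind` with an explicit default, to make the induction go through.
def pvRFindD (name : String) (a : Int) : List (Int × String) → Int
  | [] => a
  | p :: t => if p.2 = name then p.1 else pvRFindD name a t

theorem pvRFindD_neg (name : String) (l : List (Int × String)) :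
    pvRFind name l = pvRFindD name (-1) l := by
  induction l with
  | nil => rfl
  | cons p t ih => simp [pvRFind, pvRFindD, ih]

theorem pvRFindD_append (name : String) (a : Int) (u v : List (Int × String)) :
    pvRFindD name a (u ++ v) = pvRFindD name (pvRFindD name a v) u := by
  induction u with
  | nil => rfl
  | cons p t ih => simp [pvRFindD, ih]

-- A forward "keep the last match" fold equals the reverse first-match scan.
theorem foldl_keepLast_eq_rfind (name : String) (l : List (Int × String)) (a : Int) :
    l.foldl (fun acc p => if p.2 = name then p.1 else acc) a = pvRFindD name a l.reverse := by
  induction l generalizing a with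
  | nil => rfl
  | cons p t ih =>
      simp only [List.foldl_cons, List.reverse_cons, pvRFindD_append, ih]
      rfl

-- A's four-branch fold is the product of four independent "keep the last match" folds.
theorem foldA_components (k1 k2 k3 k4 : String)
    (h12 : k1 ≠ k2) (h13 : k1 ≠ k3) (h14 : k1 ≠ k4)
    (h23 : k2 ≠ k3) (h24 : k2 ≠ k4) (h34 : k3 ≠ k4)
    (l : List (Int × String)) (s : Int × Int × Int × Int) :
    l.foldl
      (fun st p =>
        if p.2 = k1 then (p.1, st.2.1, st.2.2.1, st.2.2.2)
        else if p.2 = k2 then (st.1, p.1, st.2.2.1, st.2.2.2)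
        else if p.2 = k3 then (st.1, st.2.1, p.1, st.2.2.2)
        else if p.2 = k4 then (st.1, st.2.1, st.2.2.1, p.1)
        else st) s
    = (l.foldl (fun acc p => if p.2 = k1 then p.1 else acc) s.1,
       l.foldl (fun acc p => if p.2 = k2 then p.1 else acc) s.2.1,
       l.foldl (fun acc p => if p.2 = k3 then p.1 else acc) s.2.2.1,
       l.foldl (fun acc p => if p.2 = k4 then p.1 else acc) s.2.2.2) := by
  induction l generalizing s with
  | nil => rfl
  | cons p t ih =>
      simp only [List.foldl_cons]
      by_cases h1 : p.2 = k1
      · simp [h1, h12, h13, h14, ih]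
      · by_cases h2 : p.2 = k2
        · simp [h2, Ne.symm h12, h23, h24, ih]
        · by_cases h3 : p.2 = k3
          · simp [h3, Ne.symm h13, Ne.symm h23, h34, ih]
          · by_cases h4 : p.2 = k4
            · simp [h4, Ne.symm h14, Ne.symm h24, Ne.symm h34, ih]
            · simp [h1, h2, h3, h4, ih]

-- ===== VERDICT (by name: the statement is the Claim_ definition above) =====
theorem find_column_indices_py_spec : Claim_equal_find_column_indices_py := by
  intro headers _
  unfold Spec_find_column_indices_py find_column_indices_py find_column_indices_py_alt
  rw [foldA_components "precision_status" "dyn_precision" "cst_precision" "bin_precision"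
    (by decide) (by decide) (by decide) (by decide) (by decide) (by decide)]
  simp only [foldl_keepLast_eq_rfind, pvRFindD_neg]
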